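-- pv_equiv track=rewrite | github.com/xzwj1699/USTC_DP_Lab1 | mondrian.py | mondrian
-- ===== SOURCE A (Python) =====
-- import math
--
-- def mondrian(datalist :list, k):
--     data_size = len(datalist)
--     if data_size < 2 * k:
--         return anonymitization(datalist)
--     else:
--         mid = math.floor(data_size / 2)
--         datalist_0 = [x[0] for x in datalist]
--         datalist_1 = [x[1] for x in datalist]
--         if max(datalist_0) - min(datalist_0) > max(datalist_1) - min(datalist_1):
--             datalist.sort(key = lambda x : x[0])
--         else:
--             datalist.sort(key = lambda x : x[1])
--         ano_list_1, age_loss_1, edu_loss_1 = mondrian(datalist[0:mid], k)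
--         ano_list_2, age_loss_2, edu_loss_2 = mondrian(datalist[mid:], k)
--         return ano_list_1 + ano_list_2, age_loss_1 + age_loss_2, edu_loss_1 + edu_loss_2
--
-- def anonymitization(datalist):
--     datalist_0 = [x[0] for x in datalist]
--     datalist_1 = [x[1] for x in datalist]
--     data_size = len(datalist_1)
--     max_0 = max(datalist_0)
--     min_0 = min(datalist_0)
--     max_1 = max(datalist_1)
--     min_1 = min(datalist_1)
--     str_0 = str(min_0) + '~' + str(max_0)
--     str_1 = str(min_1) + '~' + str(max_1)
--     age_loss = (max_0 - min_0) * data_size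
--     edu_loss = (max_1 - min_1) * data_size
--     return_list = []
--     for data in datalist:
--         return_list.append([str_0, str_1, data[2]])
--     return return_list, age_loss, edu_loss
-- ===== SOURCE B (Python) =====
-- def mondrian(datalist: list, k):
--     # Iterative worklist version (explicit stack) of the recursive median partitioning.
--     # Return value only: it does not replicate A's in-place sort of the caller's list.
--     rows, age_loss, edu_loss = [], 0, 0
--     stack = [datalist]
--     while stack:
--         seg = stack.pop()
--         if len(seg) < 2 * k:
--             lo0 = min(r[0] for r in seg)
--             hi0 = max(r[0] for r in seg)
--             lo1 = min(r[1] for r in seg)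
--             hi1 = max(r[1] for r in seg)
--             s0 = str(lo0) + '~' + str(hi0)
--             s1 = str(lo1) + '~' + str(hi1)
--             rows.extend([s0, s1, r[2]] for r in seg)
--             age_loss += (hi0 - lo0) * len(seg)
--             edu_loss += (hi1 - lo1) * len(seg)
--         else:
--             if max(r[0] for r in seg) - min(r[0] for r in seg) > max(r[1] for r in seg) - min(r[1] for r in seg):
--                 seg = sorted(seg, key=lambda r: r[0])
--             else:
--                 seg = sorted(seg, key=lambda r: r[1])
--             mid = len(seg) // 2
--             stack.append(seg[mid:])
--             stack.append(seg[:mid])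
--     return rows, age_loss, edu_loss
-- ===== Notes on version B (the rewrite author's own statement) =====
-- stated objective: alternative
-- what changed: The divide-and-conquer recursion is replaced by an iterative worklist: an explicit stack of segments is popped in a loop, leaves append their anonymized rows and losses to running accumulators, splits push the right half then the left half so leaves are emitted in the original left-to-right order.
import Mathlib
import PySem

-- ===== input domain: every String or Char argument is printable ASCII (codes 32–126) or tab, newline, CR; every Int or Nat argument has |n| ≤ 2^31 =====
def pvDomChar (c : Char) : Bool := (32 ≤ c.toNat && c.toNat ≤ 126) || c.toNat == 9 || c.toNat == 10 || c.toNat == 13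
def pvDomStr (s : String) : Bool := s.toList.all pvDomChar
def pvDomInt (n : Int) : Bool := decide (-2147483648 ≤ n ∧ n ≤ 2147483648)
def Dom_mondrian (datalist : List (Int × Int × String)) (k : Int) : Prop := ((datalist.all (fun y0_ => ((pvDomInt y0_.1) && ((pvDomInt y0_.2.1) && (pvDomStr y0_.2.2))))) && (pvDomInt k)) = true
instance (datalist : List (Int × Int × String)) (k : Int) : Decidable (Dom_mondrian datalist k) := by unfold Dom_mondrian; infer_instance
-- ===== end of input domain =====

-- B replaces A's recursion by an explicit-stack worklist with running accumulators (return value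
-- only: B does not replicate A's in-place sort of the caller's top-level list, which A performs).

-- ===== PORT A =====
-- anonymitization: min/max of the two numeric columns, range strings, loss = range * size, rows
-- built by an append loop.  max()/min() of an empty list raise ValueError in Python → the '.getD 0'
-- is a totalization guard, reachable only outside Pre_.
def pyAnon (datalist : List (Int × Int × String)) : List (List String) × Int × Int :=
  let datalist0 := datalist.map (fun x => x.1)
  let datalist1 := datalist.map (fun x => x.2.1)
  let dataSize : Int := datalist1.length
  let max0 := (PySem.List.max? datalist0 (fun y => y)).getD 0
  let min0 := (PySem.List.min? datalist0 (fun y => y)).getD 0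
  let max1 := (PySem.List.max? datalist1 (fun y => y)).getD 0
  let min1 := (PySem.List.min? datalist1 (fun y => y)).getD 0
  let str0 := PySem.Int.toStr min0 ++ "~" ++ PySem.Int.toStr max0
  let str1 := PySem.Int.toStr min1 ++ "~" ++ PySem.Int.toStr max1
  let ageLoss := (max0 - min0) * dataSize
  let eduLoss := (max1 - min1) * dataSize
  let returnList := datalist.foldl (fun acc data => acc ++ [[str0, str1, data.2.2]]) []
  (returnList, ageLoss, eduLoss)

-- A's column extraction + range comparison + sort, named so the proofs can speak about it:
-- 'if max0-min0 > max1-min1: sort by x[0] else: sort by x[1]' (Python's sort is stable = sorted).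
def widerSortA (datalist : List (Int × Int × String)) : List (Int × Int × String) :=
  let datalist0 := datalist.map (fun x => x.1)
  let datalist1 := datalist.map (fun x => x.2.1)
  if (PySem.List.max? datalist0 (fun y => y)).getD (0 : Int) - (PySem.List.min? datalist0 (fun y => y)).getD 0 >
     (PySem.List.max? datalist1 (fun y => y)).getD 0 - (PySem.List.min? datalist1 (fun y => y)).getD 0
  then PySem.List.sorted datalist (fun x => x.1) false
  else PySem.List.sorted datalist (fun x => x.2.1) false

theorem length_widerSortA (xs : List (Int × Int × String)) :
    (widerSortA xs).length = xs.length := by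
  unfold widerSortA; dsimp only; split <;> simp [PySem.List.length_sorted]

-- Termination facts, cited by name from the ports' decreasing_by blocks.
theorem widerSortA_take_lt (xs : List (Int × Int × String)) (h : 2 ≤ xs.length) :
    ((widerSortA xs).take (xs.length / 2)).length < xs.length := by
  simp [length_widerSortA]; omega

theorem widerSortA_drop_lt (xs : List (Int × Int × String)) (h : 2 ≤ xs.length) :
    ((widerSortA xs).drop (xs.length / 2)).length < xs.length := by
  simp [length_widerSortA]; omega

-- A: recursive median partitioning.  mid = math.floor(n/2) = n / 2 on Nat; datalist[0:mid] is
-- take mid and datalist[mid:] is drop mid (0 ≤ mid ≤ n).  The 'if _h : 2 ≤ …' guard only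
-- totalizes: when n ≤ 1 and ¬ n < 2k (so k ≤ 0, outside Pre_) Python recurses forever / raises.
def mondrian (datalist : List (Int × Int × String)) (k : Int) : List (List String) × Int × Int :=
  let dataSize : Int := datalist.length
  if dataSize < 2 * k then pyAnon datalist
  else
    let mid := datalist.length / 2
    let sortedList := widerSortA datalist
    if _h : 2 ≤ datalist.length then
      let r1 := mondrian (sortedList.take mid) k
      let r2 := mondrian (sortedList.drop mid) k
      (r1.1 ++ r2.1, r1.2.1 + r2.2.1, r1.2.2 + r2.2.2)
    else ([], 0, 0)
termination_by datalist.length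
decreasing_by
  · exact widerSortA_take_lt datalist _h
  · exact widerSortA_drop_lt datalist _h

-- ===== PORT B =====
-- B's dimension choice + sort (Source B computes min/max over generators of the two columns).
def widerSortB (seg : List (Int × Int × String)) : List (Int × Int × String) :=
  if (PySem.List.max? (seg.map (fun r => r.1)) (fun y => y)).getD (0 : Int) -
       (PySem.List.min? (seg.map (fun r => r.1)) (fun y => y)).getD 0 >
     (PySem.List.max? (seg.map (fun r => r.2.1)) (fun y => y)).getD 0 -
       (PySem.List.min? (seg.map (fun r => r.2.1)) (fun y => y)).getD 0
  then PySem.List.sorted seg (fun r => r.1) false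
  else PySem.List.sorted seg (fun r => r.2.1) false

-- Source B's while loop over the explicit stack (head = top of stack); a popped leaf extends the row
-- and loss accumulators, a split pushes the right half then the left half.  The fuel argument only
-- totalizes the loop (2*len+1 iterations always suffice under Pre_, proved below); on fuel 0 — and
-- for k ≤ 0, where Source B's while loop never terminates — it returns the irrelevant ([], 0, 0).
def mloop (k : Int) : Nat → List (List (Int × Int × String)) → List (List String) → Int → Int →
    List (List String) × Int × Int
  | _, [], rows, ageLoss, eduLoss => (rows, ageLoss, eduLoss)
  | 0, _ :: _, _, _, _ => ([], 0, 0)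
  | fuel + 1, seg :: rest, rows, ageLoss, eduLoss =>
    if (seg.length : Int) < 2 * k then
      let lo0 := (PySem.List.min? (seg.map (fun r => r.1)) (fun y => y)).getD 0
      let hi0 := (PySem.List.max? (seg.map (fun r => r.1)) (fun y => y)).getD 0
      let lo1 := (PySem.List.min? (seg.map (fun r => r.2.1)) (fun y => y)).getD 0
      let hi1 := (PySem.List.max? (seg.map (fun r => r.2.1)) (fun y => y)).getD 0
      let s0 := PySem.Int.toStr lo0 ++ "~" ++ PySem.Int.toStr hi0
      let s1 := PySem.Int.toStr lo1 ++ "~" ++ PySem.Int.toStr hi1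
      mloop k fuel rest (rows ++ seg.map (fun r => [s0, s1, r.2.2]))
        (ageLoss + (hi0 - lo0) * seg.length) (eduLoss + (hi1 - lo1) * seg.length)
    else
      let seg' := widerSortB seg
      let mid := seg.length / 2
      mloop k fuel (seg'.take mid :: seg'.drop mid :: rest) rows ageLoss eduLoss

def mondrian_alt (datalist : List (Int × Int × String)) (k : Int) : List (List String) × Int × Int :=
  mloop k (2 * datalist.length + 1) [datalist] [] 0 0

-- ===== PRECONDITION & SPEC =====
-- Pre_ excludes exactly the inputs on which A raises (returns nothing): the empty list (max([]) is
-- a ValueError in the leaf) and k ≤ 0 (the recursion then reaches an empty or size-1 slice and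
-- raises ValueError / RecursionError, never returning a value).
def Pre_mondrian (datalist : List (Int × Int × String)) (k : Int) : Prop :=
  datalist ≠ [] ∧ 1 ≤ k
instance (datalist : List (Int × Int × String)) (k : Int) : Decidable (Pre_mondrian datalist k) := by
  unfold Pre_mondrian; infer_instance

def pvWitness_mondrian : (List (Int × Int × String)) × Int := ([(25, 9, "a"), (30, 12, "b")], 1)

def Spec_mondrian (datalist : List (Int × Int × String)) (k : Int) (out : List (List String) × Int × Int) : Prop := out = mondrian_alt datalist k
instance (datalist : List (Int × Int × String)) (k : Int) (out : List (List String) × Int × Int) : Decidable (Spec_mondrian datalist k out) := by unfold Spec_mondrian; infer_instance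

-- ===== CLAIM (what is proved, stated in full; the proofs are below) =====
def Claim_equal_mondrian : Prop := ∀ (datalist : List (Int × Int × String)) (k : Int), Dom_mondrian datalist k → Pre_mondrian datalist k → Spec_mondrian datalist k (mondrian datalist k)

-- ===== LEMMAS AND PROOFS =====

theorem widerSortB_eq (s : List (Int × Int × String)) : widerSortB s = widerSortA s := by
  unfold widerSortA widerSortB; rfl

-- Loop invariant: popping one nonempty segment takes some number 'used' of iterations
-- (at most 2*len-1, so the port's fuel suffices) and contributes exactly A's recursive result.
theorem mloop_cons (k : Int) (hk : 1 ≤ k) :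
    ∀ (n : Nat) (seg : List (Int × Int × String)), seg.length ≤ n → seg ≠ [] →
    ∃ used : Nat, 1 ≤ used ∧ used ≤ 2 * seg.length - 1 ∧
    ∀ (fuel : Nat) (stack : List (List (Int × Int × String))) (rows : List (List String)) (a e : Int),
      used ≤ fuel →
      mloop k fuel (seg :: stack) rows a e =
        mloop k (fuel - used) stack (rows ++ (mondrian seg k).1)
          (a + (mondrian seg k).2.1) (e + (mondrian seg k).2.2) := by
  intro n
  induction n with
  | zero =>
    intro seg hle hne
    exact absurd (List.eq_nil_of_length_eq_zero (Nat.le_zero.mp hle)) hne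
  | succ n ih =>
    intro seg hle hne
    have hpos : 1 ≤ seg.length := List.length_pos_of_ne_nil hne
    by_cases hlt : (seg.length : Int) < 2 * k
    · refine ⟨1, le_rfl, by omega, ?_⟩
      intro fuel stack rows a e hfuel
      obtain ⟨f, rfl⟩ : ∃ f, fuel = f + 1 := ⟨fuel - 1, by omega⟩
      rw [mloop, mondrian]
      simp only [if_pos hlt, pyAnon, PySem.List.foldl_append_singleton_eq_map,
        List.length_map, List.nil_append, Nat.add_sub_cancel]
    · have h2 : 2 ≤ seg.length := by
        have h1 := Int.not_lt.mp hlt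
        omega
      have hmid1 : 1 ≤ seg.length / 2 := by omega
      obtain ⟨u1, hu1a, hu1b, hu1⟩ := ih ((widerSortA seg).take (seg.length / 2))
        (by simp [length_widerSortA]; omega)
        (by apply List.ne_nil_of_length_pos; simp [length_widerSortA]; omega)
      obtain ⟨u2, hu2a, hu2b, hu2⟩ := ih ((widerSortA seg).drop (seg.length / 2))
        (by simp [length_widerSortA]; omega)
        (by apply List.ne_nil_of_length_pos; simp [length_widerSortA]; omega)
      have hlt1 : ((widerSortA seg).take (seg.length / 2)).length = seg.length / 2 := by
        simp [length_widerSortA]; omega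
      have hld : ((widerSortA seg).drop (seg.length / 2)).length = seg.length - seg.length / 2 := by
        simp [length_widerSortA]
      rw [hlt1] at hu1b; rw [hld] at hu2b
      refine ⟨1 + u1 + u2, by omega, by omega, ?_⟩
      intro fuel stack rows a e hfuel
      obtain ⟨f, rfl⟩ : ∃ f, fuel = f + 1 := ⟨fuel - 1, by omega⟩
      rw [mloop, mondrian]
      simp only [if_neg hlt, dif_pos h2, widerSortB_eq]
      rw [hu1 f _ _ _ _ (by omega), hu2 (f - u1) _ _ _ _ (by omega)]
      have hsub : f - u1 - u2 = f + 1 - (1 + (u1 + u2)) := by omega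
      rw [hsub, List.append_assoc, add_assoc, add_assoc,
        (by omega : f + 1 - (1 + (u1 + u2)) = f + 1 - (1 + u1 + u2))]

-- ===== VERDICT (by name: the statement is the Claim_ definition above) =====
theorem mondrian_spec : Claim_equal_mondrian := by
  intro datalist k _hdom hpre
  obtain ⟨hne, hk⟩ := hpre
  unfold Spec_mondrian mondrian_alt
  obtain ⟨used, hua, hub, hu⟩ := mloop_cons k hk datalist.length datalist le_rfl hne
  have hpos : 1 ≤ datalist.length := List.length_pos_of_ne_nil hne
  rw [hu (2 * datalist.length + 1) [] [] 0 0 (by omega), mloop]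
  simp
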